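-- pv_equiv track=rewrite | github.com/pypi-data/pypi-mirror-315 | packages/regex-enumerator/regex_enumerator-0.2.0-py3-none-any.whl/regex_enumerator/regex_parser.py | _parseMinMax
-- ===== SOURCE A (Python) =====
-- def _parseMinMax(regex: str) -> tuple[int, int, int]:
--     i = 0
--     min_len = 0
--     max_len = 0
--
--     while i < len(regex) and regex[i] == ' ':
--         i += 1
--
--     if i >= len(regex) or regex[i] not in '0123456789':
--         raise ValueError('Invalid quantifier')
--
--     while i < len(regex) and regex[i] in '0123456789':
--         min_len = min_len * 10 + int(regex[i])
--         i += 1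
--
--     while i < len(regex) and regex[i] == ' ':
--         i += 1
--
--     if i >= len(regex):
--         raise ValueError('Invalid quantifier')
--     elif regex[i] == '}':
--         return i + 1, min_len, min_len
--     elif regex[i] != ',':
--         raise ValueError('Invalid quantifier')
--
--     i += 1
--
--     while i < len(regex) and regex[i] == ' ':
--         i += 1
--
--     if i >= len(regex) or regex[i] not in '0123456789}':
--         raise ValueError('Invalid quantifier')
--
--     if regex[i] == '}':
--         return i + 1, min_len, None
--
--     while i < len(regex) and regex[i] in '0123456789':
--         max_len = max_len * 10 + int(regex[i])
--         i += 1
--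
--     if max_len < min_len:
--         raise ValueError('Invalid quantifier')
--
--     while i < len(regex) and regex[i] == ' ':
--         i += 1
--
--     if i >= len(regex) or regex[i] != '}':
--         raise ValueError('Invalid quantifier')
--
--     i += 1
--
--     return i, min_len, max_len
-- ===== SOURCE B (Python) =====
-- def _parseMinMax(regex: str) -> tuple[int, int, int]:
--     # find the closing brace first, then split the head on ',' and validate each field
--     end = regex.index('}')
--     parts = regex[:end].split(',')
--     if len(parts) > 2:
--         raise ValueError('Invalid quantifier')
--     lo = parts[0].strip(' ')
--     if not lo or any(c not in '0123456789' for c in lo):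
--         raise ValueError('Invalid quantifier')
--     min_len = int(lo)
--     if len(parts) == 1:
--         return end + 1, min_len, min_len
--     hi = parts[1].strip(' ')
--     if not hi:
--         return end + 1, min_len, None
--     if any(c not in '0123456789' for c in hi):
--         raise ValueError('Invalid quantifier')
--     max_len = int(hi)
--     if max_len < min_len:
--         raise ValueError('Invalid quantifier')
--     return end + 1, min_len, max_len
-- ===== Notes on version B (the rewrite author's own statement) =====
-- stated objective: simpler
-- what changed: A walks the string left-to-right with an index cursor through nine hand-written while/if stages; B locates the closing brace once, splits the head at the comma and validates/converts each stripped field with string methods.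
import Mathlib
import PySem

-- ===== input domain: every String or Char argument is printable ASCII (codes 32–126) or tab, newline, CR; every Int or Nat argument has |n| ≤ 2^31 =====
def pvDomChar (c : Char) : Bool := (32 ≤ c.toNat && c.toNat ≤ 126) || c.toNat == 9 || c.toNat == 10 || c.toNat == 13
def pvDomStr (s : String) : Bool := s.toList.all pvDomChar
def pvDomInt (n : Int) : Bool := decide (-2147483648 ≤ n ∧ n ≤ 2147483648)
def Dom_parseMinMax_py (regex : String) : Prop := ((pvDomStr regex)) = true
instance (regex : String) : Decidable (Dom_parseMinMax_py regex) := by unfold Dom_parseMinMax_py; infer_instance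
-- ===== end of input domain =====

-- B replaces A's nine-stage index-cursor scanner by: find the closing brace, split the
-- head at the comma and validate/convert each stripped field (objective: simpler).  On
-- inputs where the Python raises ValueError (excluded by Pre_) both ports return (0, 0, none).

-- shared character/number helpers (used by the ports and by Pre_)
def isDig (c : Char) : Bool := c ∈ ['0','1','2','3','4','5','6','7','8','9']

def digStep (a : Int) (c : Char) : Int := a * 10 + ((c.toNat : Int) - 48)

def valOf (d : List Char) : Int := d.foldl digStep 0

-- ===== PORT A =====
-- "while i < len(regex) and regex[i] == ' ': i += 1"  (returns the rest and the new i)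
def aSkipSp : List Char → Nat → List Char × Nat
  | [], i => ([], i)
  | c :: r, i => if c == ' ' then aSkipSp r (i + 1) else (c :: r, i)

-- "while i < len(regex) and regex[i] in '0123456789': v = v*10 + int(regex[i]); i += 1"
def aNum : List Char → Nat → Int → List Char × Nat × Int
  | [], i, v => ([], i, v)
  | c :: r, i, v => if isDig c then aNum r (i + 1) (digStep v c) else (c :: r, i, v)

def parseMinMax_py (regex : String) : Int × Int × Option Int :=
  let l := regex.toList
  let p1 := aSkipSp l 0
  match p1.1 with
  | [] => (0, 0, none)                    -- raise ValueError (outside Pre_)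
  | c :: _ =>
    if !(isDig c) then (0, 0, none)       -- raise ValueError (outside Pre_)
    else
      let p2 := aNum p1.1 p1.2 0          -- (rest, i, min_len)
      let p3 := aSkipSp p2.1 p2.2.1
      match p3.1 with
      | [] => (0, 0, none)                -- raise ValueError (outside Pre_)
      | '}' :: _ => ((p3.2 : Int) + 1, p2.2.2, some p2.2.2)
      | ',' :: r =>
        let p4 := aSkipSp r (p3.2 + 1)
        match p4.1 with
        | [] => (0, 0, none)              -- raise ValueError (outside Pre_)
        | '}' :: _ => ((p4.2 : Int) + 1, p2.2.2, none)
        | c' :: _ =>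
          if !(isDig c') then (0, 0, none)  -- raise ValueError (outside Pre_)
          else
            let p5 := aNum p4.1 p4.2 0    -- (rest, i, max_len)
            if p5.2.2 < p2.2.2 then (0, 0, none)  -- raise ValueError (outside Pre_)
            else
              let p6 := aSkipSp p5.1 p5.2.1
              match p6.1 with
              | '}' :: _ => ((p6.2 : Int) + 1, p2.2.2, some p5.2.2)
              | _ => (0, 0, none)         -- raise ValueError (outside Pre_)
      | _ => (0, 0, none)                 -- raise ValueError (outside Pre_)

-- ===== PORT B =====
def parseMinMax_py_alt (regex : String) : Int × Int × Option Int :=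
  let l := regex.toList
  -- regex.index('}') : for a one-character needle str.index is exactly the first index of that char
  match PySem.List.index? l '}' with
  | none => (0, 0, none)                  -- .index raises ValueError (outside Pre_)
  | some e =>
    let parts := PySem.Chars.splitOn (l.take e) [',']
    if 2 < parts.length then (0, 0, none) -- raise ValueError (outside Pre_)
    else
      let lo := PySem.Chars.stripChars (parts.headD []) [' ']
      if lo.isEmpty || lo.any (fun c => !(isDig c)) then (0, 0, none)  -- raise ValueError (outside Pre_)
      else
        -- int(lo): exact here, lo is a nonempty string of ASCII digits by the guard above
        let minLen := lo.foldl digStep 0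
        if parts.length == 1 then ((e : Int) + 1, minLen, some minLen)
        else
          let hi := PySem.Chars.stripChars (parts.getD 1 []) [' ']
          if hi.isEmpty then ((e : Int) + 1, minLen, none)
          else if hi.any (fun c => !(isDig c)) then (0, 0, none)  -- raise ValueError (outside Pre_)
          else
            -- int(hi): exact here, hi is a nonempty string of ASCII digits by the guard above
            let maxLen := hi.foldl digStep 0
            if maxLen < minLen then (0, 0, none)  -- raise ValueError (outside Pre_)
            else ((e : Int) + 1, minLen, some maxLen)

-- ===== PRECONDITION & SPEC =====
-- Pre_ holds exactly on the inputs where the Python A returns (does not raise ValueError):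
-- spaces, a number, spaces, then '}'  —  or  ','  followed by spaces and '}'  —  or  ','
-- followed by spaces, a number ≥ the first one, spaces and '}'.
def Pre_parseMinMax_py (regex : String) : Prop :=
  let l := regex.toList
  let l1 := l.dropWhile (· == ' ')
  let d1 := l1.takeWhile isDig
  let l3 := (l1.dropWhile isDig).dropWhile (· == ' ')
  d1 ≠ [] ∧
  (l3.head? = some '}' ∨
    (l3.head? = some ',' ∧
      (let r1 := l3.tail.dropWhile (· == ' ')
       r1.head? = some '}' ∨
         (let d2 := r1.takeWhile isDig
          let r2 := (r1.dropWhile isDig).dropWhile (· == ' ')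
          d2 ≠ [] ∧ valOf d1 ≤ valOf d2 ∧ r2.head? = some '}'))))
instance (regex : String) : Decidable (Pre_parseMinMax_py regex) := by
  unfold Pre_parseMinMax_py; infer_instance

def pvWitness_parseMinMax_py : String := " 12 , 34 } rest"

def Spec_parseMinMax_py (regex : String) (out : Int × Int × Option Int) : Prop := out = parseMinMax_py_alt regex
instance (regex : String) (out : Int × Int × Option Int) : Decidable (Spec_parseMinMax_py regex out) := by unfold Spec_parseMinMax_py; infer_instance

-- ===== CLAIM (what is proved, stated in full; the proofs are below) =====
def Claim_equal_parseMinMax_py : Prop := ∀ (regex : String), Dom_parseMinMax_py regex → Pre_parseMinMax_py regex → Spec_parseMinMax_py regex (parseMinMax_py regex)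

-- ===== LEMMAS AND PROOFS =====

-- A's space loop is takeWhile/dropWhile on (· == ' ')
theorem aSkipSp_eq (l : List Char) (i : Nat) :
    aSkipSp l i = (l.dropWhile (· == ' '), i + (l.takeWhile (· == ' ')).length) := by
  induction l generalizing i with
  | nil => simp [aSkipSp]
  | cons c r ih =>
    by_cases h : c == ' '
    · simp [aSkipSp, h, ih]; omega
    · simp [aSkipSp, h]

-- A's digit loop is takeWhile/dropWhile on isDig plus a fold over the digits read
theorem aNum_eq (l : List Char) (i : Nat) (v : Int) :
    aNum l i v = (l.dropWhile isDig, i + (l.takeWhile isDig).length,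
                  (l.takeWhile isDig).foldl digStep v) := by
  induction l generalizing i v with
  | nil => simp [aNum]
  | cons c r ih =>
    by_cases h : isDig c
    · simp [aNum, h, ih]; omega
    · simp [aNum, h]

theorem dropWhile_all_append {p : Char → Bool} {u : List Char} (v : List Char)
    (hu : ∀ x ∈ u, p x = true) : List.dropWhile p (u ++ v) = List.dropWhile p v := by
  induction u with
  | nil => rfl
  | cons c r ih => simp_all

theorem takeWhile_all_append {p : Char → Bool} {u : List Char} (v : List Char)
    (hu : ∀ x ∈ u, p x = true) : List.takeWhile p (u ++ v) = u ++ List.takeWhile p v := by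
  induction u with
  | nil => rfl
  | cons c r ih => simp_all

theorem dropWhile_head_false {p : Char → Bool} {v : List Char}
    (hv : ∀ c, v.head? = some c → p c = false) : List.dropWhile p v = v := by
  cases v with
  | nil => rfl
  | cons c r => simp [hv c rfl]

theorem takeWhile_head_false {p : Char → Bool} {v : List Char}
    (hv : ∀ c, v.head? = some c → p c = false) : List.takeWhile p v = [] := by
  cases v with
  | nil => rfl
  | cons c r => simp [hv c rfl]


-- a digit character is not a space, a comma or a brace (and conversely)
theorem isDig_ne_space {c : Char} (h : isDig c = true) : ([' '].contains c) = false := by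
  simp [isDig] at h
  rcases h with h|h|h|h|h|h|h|h|h|h <;> simp [h]

theorem isDig_beq_space {c : Char} (h : isDig c = true) : (c == ' ') = false := by
  simp [isDig] at h
  rcases h with h|h|h|h|h|h|h|h|h|h <;> simp [h]

theorem space_not_dig {c : Char} (h : c = ' ') : isDig c = false := by subst h; decide

theorem isDig_ne_brace {c : Char} (h : isDig c = true) : c ≠ '}' := by
  simp [isDig] at h
  rcases h with h|h|h|h|h|h|h|h|h|h <;> simp [h]

theorem isDig_ne_comma {c : Char} (h : isDig c = true) : c ≠ ',' := by
  simp [isDig] at h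
  rcases h with h|h|h|h|h|h|h|h|h|h <;> simp [h]

-- first index of '}' after a brace-free prefix
theorem idxOf_brace (pre rest : List Char) (h : '}' ∉ pre) :
    List.idxOf? '}' (pre ++ '}' :: rest) = some pre.length := by
  induction pre with
  | nil => simp [List.idxOf?_cons]
  | cons c r ih =>
    have hc : ¬ c = '}' := fun hh => h (by simp [hh])
    simp [List.idxOf?_cons, beq_iff_eq, ih (by simp_all), hc]

-- str.split(',') on a comma-free list / on a list with exactly one separating comma
theorem splitOn_go_none (fuel : Nat) (l cur : List Char) (acc : List (List Char))
    (hl : ',' ∉ l) (hf : l.length ≤ fuel) :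
    PySem.Chars.splitOn.go [','] fuel l cur acc = ((cur.reverse ++ l) :: acc).reverse := by
  induction fuel generalizing l cur acc with
  | zero => cases l with
    | nil => rfl
    | cons c r => simp at hf
  | succ f ih =>
    cases l with
    | nil => simp [PySem.Chars.splitOn.go]
    | cons c r =>
      have hc : [','].isPrefixOf (c :: r) = false := by
        simp [List.isPrefixOf]; intro hc'; exact hl (hc' ▸ List.mem_cons_self)
      rw [PySem.Chars.splitOn.go.eq_def]
      simp only [hc, Bool.false_eq_true, if_false]
      rw [ih r (c :: cur) acc (fun hm => hl (List.mem_cons_of_mem _ hm)) (by simpa using Nat.le_of_succ_le_succ hf)]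
      simp

theorem splitOn_go_sep (a b cur : List Char) (acc : List (List Char)) (fuel : Nat)
    (ha : ',' ∉ a) (hf : a.length < fuel) :
    PySem.Chars.splitOn.go [','] fuel (a ++ ',' :: b) cur acc =
      PySem.Chars.splitOn.go [','] (fuel - (a.length + 1)) b [] ((cur.reverse ++ a) :: acc) := by
  induction a generalizing fuel cur with
  | nil =>
    cases fuel with
    | zero => omega
    | succ f =>
      rw [PySem.Chars.splitOn.go.eq_def]
      simp [List.isPrefixOf]
  | cons c r ih =>
    cases fuel with
    | zero => omega
    | succ f =>
      have hc : [','].isPrefixOf (c :: (r ++ ',' :: b)) = false := by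
        simp [List.isPrefixOf]; intro hc'; exact ha (hc' ▸ List.mem_cons_self)
      rw [PySem.Chars.splitOn.go.eq_def]
      simp only [List.cons_append, hc, Bool.false_eq_true, if_false]
      rw [ih (c :: cur) f (fun hm => ha (List.mem_cons_of_mem _ hm)) (by simp at hf ⊢; omega)]
      simp [List.length_cons]

theorem splitOn_single (l : List Char) (hl : ',' ∉ l) :
    PySem.Chars.splitOn l [','] = [l] := by
  rw [PySem.Chars.splitOn, splitOn_go_none _ _ _ _ hl (by omega)]; rfl

theorem splitOn_pair (a b : List Char) (ha : ',' ∉ a) (hb : ',' ∉ b) :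
    PySem.Chars.splitOn (a ++ ',' :: b) [','] = [a, b] := by
  rw [PySem.Chars.splitOn, splitOn_go_sep a b [] [] _ ha (by simp)]
  rw [splitOn_go_none _ _ _ _ hb (by simp)]
  rfl

-- str.strip(' ')
theorem strip_spaces (s : List Char) (h : ∀ x ∈ s, x = ' ') :
    PySem.Chars.stripChars s [' '] = [] := by
  show (List.dropWhile (fun c => [' '].contains c)
      (List.dropWhile (fun c => [' '].contains c) s).reverse).reverse = []
  have h1 : List.dropWhile (fun c => [' '].contains c) s = [] := by
    rw [List.dropWhile_eq_nil_iff]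
    intro x hx; simp [h x hx]
  rw [h1]
  rfl

theorem strip_mid (s1 d s2 : List Char) (h1 : ∀ x ∈ s1, x = ' ') (h2 : ∀ x ∈ s2, x = ' ')
    (hd : ∀ x ∈ d, isDig x = true) (hne : d ≠ []) :
    PySem.Chars.stripChars (s1 ++ d ++ s2) [' '] = d := by
  show (List.dropWhile (fun c => [' '].contains c)
      (List.dropWhile (fun c => [' '].contains c) (s1 ++ d ++ s2)).reverse).reverse = d
  have hp1 : ∀ x ∈ s1, ((fun c => [' '].contains c) x) = true := by
    intro x hx; simp [h1 x hx]
  rw [List.append_assoc, dropWhile_all_append _ hp1]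
  have hds : List.dropWhile (fun c => [' '].contains c) (d ++ s2) = d ++ s2 := by
    apply dropWhile_head_false
    intro c hc
    cases d with
    | nil => exact absurd rfl hne
    | cons a r =>
      simp at hc
      exact hc ▸ isDig_ne_space (hd a (by simp))
  rw [hds, List.reverse_append]
  have hp2 : ∀ x ∈ s2.reverse, ((fun c => [' '].contains c) x) = true := by
    intro x hx; simp [h2 x (by simpa using hx)]
  rw [dropWhile_all_append _ hp2]
  have hdr : List.dropWhile (fun c => [' '].contains c) d.reverse = d.reverse := by
    apply dropWhile_head_false
    intro c hc
    have : c ∈ d := by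
      have := List.mem_of_mem_head? hc
      simpa using this
    exact isDig_ne_space (hd c this)
  rw [hdr, List.reverse_reverse]
theorem head_sp_brace (s2 r : List Char) (h2 : ∀ x ∈ s2, x = ' ') :
    ∀ c, (s2 ++ '}' :: r).head? = some c → isDig c = false := by
  intro c hc
  cases s2 with
  | nil => simp at hc; subst hc; decide
  | cons a t =>
    simp at hc
    rw [← hc]
    exact space_not_dig (h2 a (by simp))

theorem A_case1 (regex : String) (s1 d1 s2 r : List Char)
    (hl : regex.toList = s1 ++ (d1 ++ (s2 ++ '}' :: r)))
    (h1 : ∀ x ∈ s1, x = ' ') (h2 : ∀ x ∈ s2, x = ' ')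
    (hd : ∀ x ∈ d1, isDig x = true) (hne : d1 ≠ []) :
    parseMinMax_py regex =
      (((s1.length + d1.length + s2.length : Nat) : Int) + 1, valOf d1, some (valOf d1)) := by
  obtain ⟨c, d', rfl⟩ : ∃ c d', d1 = c :: d' := by
    cases d1 with
    | nil => exact absurd rfl hne
    | cons a t => exact ⟨a, t, rfl⟩
  have hsp1 : ∀ x ∈ s1, ((fun c => c == ' ') x) = true := fun x hx => by simp [h1 x hx]
  have e1 : aSkipSp regex.toList 0 = ((c :: d') ++ (s2 ++ '}' :: r), s1.length) := by
    rw [aSkipSp_eq, hl, dropWhile_all_append _ hsp1, takeWhile_all_append _ hsp1]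
    rw [dropWhile_head_false (v := (c :: d') ++ (s2 ++ '}' :: r)) (by
      intro x hx; simp at hx; rw [← hx]; exact isDig_beq_space (hd c (by simp)))]
    rw [takeWhile_head_false (v := (c :: d') ++ (s2 ++ '}' :: r)) (by
      intro x hx; simp at hx; rw [← hx]; exact isDig_beq_space (hd c (by simp)))]
    simp
  have e2 : aNum ((c :: d') ++ (s2 ++ '}' :: r)) s1.length 0 =
      (s2 ++ '}' :: r, s1.length + (c :: d').length, valOf (c :: d')) := by
    rw [aNum_eq]
    rw [dropWhile_all_append _ hd, takeWhile_all_append _ hd]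
    rw [dropWhile_head_false (hv := head_sp_brace s2 r h2)]
    rw [takeWhile_head_false (hv := head_sp_brace s2 r h2)]
    simp [valOf]
  have hsp2 : ∀ x ∈ s2, ((fun c => c == ' ') x) = true := fun x hx => by simp [h2 x hx]
  have e3 : aSkipSp (s2 ++ '}' :: r) (s1.length + (c :: d').length) =
      ('}' :: r, s1.length + (c :: d').length + s2.length) := by
    rw [aSkipSp_eq, dropWhile_all_append _ hsp2, takeWhile_all_append _ hsp2]
    simp
  unfold parseMinMax_py
  simp only [e1, e2, e3]
  simp
  exact hd c (by simp)
theorem no_brace_mid (s1 d1 s2 : List Char) (h1 : ∀ x ∈ s1, x = ' ') (h2 : ∀ x ∈ s2, x = ' ')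
    (hd : ∀ x ∈ d1, isDig x = true) : '}' ∉ s1 ++ d1 ++ s2 := by
  intro hx
  rcases List.mem_append.1 hx with hx | hx
  · rcases List.mem_append.1 hx with hx | hx
    · exact absurd (h1 _ hx) (by decide)
    · exact absurd (hd _ hx) (by decide)
  · exact absurd (h2 _ hx) (by decide)

theorem no_comma_mid (s1 d1 s2 : List Char) (h1 : ∀ x ∈ s1, x = ' ') (h2 : ∀ x ∈ s2, x = ' ')
    (hd : ∀ x ∈ d1, isDig x = true) : ',' ∉ s1 ++ d1 ++ s2 := by
  intro hx
  rcases List.mem_append.1 hx with hx | hx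
  · rcases List.mem_append.1 hx with hx | hx
    · exact absurd (h1 _ hx) (by decide)
    · exact absurd (hd _ hx) (by decide)
  · exact absurd (h2 _ hx) (by decide)

theorem B_case1 (regex : String) (s1 d1 s2 r : List Char)
    (hl : regex.toList = s1 ++ d1 ++ s2 ++ '}' :: r)
    (h1 : ∀ x ∈ s1, x = ' ') (h2 : ∀ x ∈ s2, x = ' ')
    (hd : ∀ x ∈ d1, isDig x = true) (hne : d1 ≠ []) :
    parseMinMax_py_alt regex =
      (((s1.length + d1.length + s2.length : Nat) : Int) + 1, valOf d1, some (valOf d1)) := by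
  have hpre : regex.toList = (s1 ++ d1 ++ s2) ++ '}' :: r := by simpa [List.append_assoc] using hl
  have hidx : PySem.List.index? regex.toList '}' = some (s1 ++ d1 ++ s2).length := by
    rw [PySem.List.index?_eq_idxOf?, hpre, idxOf_brace _ _ (no_brace_mid s1 d1 s2 h1 h2 hd)]
  have htake : regex.toList.take (s1 ++ d1 ++ s2).length = s1 ++ d1 ++ s2 := by
    rw [hpre]; exact List.take_left
  have hsplit : PySem.Chars.splitOn (s1 ++ d1 ++ s2) [','] = [s1 ++ d1 ++ s2] :=
    splitOn_single _ (no_comma_mid s1 d1 s2 h1 h2 hd)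
  have hstrip := strip_mid s1 d1 s2 h1 h2 hd hne
  have hall : (d1.any fun c => !(isDig c)) = false := by
    simp only [List.any_eq_false]
    intro x hx; simp [hd x hx]
  unfold parseMinMax_py_alt
  simp only [hidx, htake, hsplit]
  simp only [List.headD_cons, hstrip, List.length_cons, List.length_nil]
  have hemp : d1.isEmpty = false := by simpa [List.isEmpty_iff] using hne
  simp [hemp, hall, valOf]
  omega
theorem head_sp_nd (s2 r : List Char) (c0 : Char) (h2 : ∀ x ∈ s2, x = ' ')
    (hc0 : isDig c0 = false) :
    ∀ c, (s2 ++ c0 :: r).head? = some c → isDig c = false := by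
  intro c hc
  cases s2 with
  | nil => simp at hc; rw [← hc]; exact hc0
  | cons a t =>
    simp at hc
    rw [← hc]
    exact space_not_dig (h2 a (by simp))

theorem A_case2 (regex : String) (s1 d1 s2 s3 r : List Char)
    (hl : regex.toList = s1 ++ (d1 ++ (s2 ++ ',' :: (s3 ++ '}' :: r))))
    (h1 : ∀ x ∈ s1, x = ' ') (h2 : ∀ x ∈ s2, x = ' ') (h3 : ∀ x ∈ s3, x = ' ')
    (hd : ∀ x ∈ d1, isDig x = true) (hne : d1 ≠ []) :
    parseMinMax_py regex =
      (((s1.length + d1.length + s2.length + 1 + s3.length : Nat) : Int) + 1, valOf d1, none) := by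
  obtain ⟨c, d', rfl⟩ : ∃ c d', d1 = c :: d' := by
    cases d1 with
    | nil => exact absurd rfl hne
    | cons a t => exact ⟨a, t, rfl⟩
  have hsp1 : ∀ x ∈ s1, ((fun c => c == ' ') x) = true := fun x hx => by simp [h1 x hx]
  have hsp2 : ∀ x ∈ s2, ((fun c => c == ' ') x) = true := fun x hx => by simp [h2 x hx]
  have hsp3 : ∀ x ∈ s3, ((fun c => c == ' ') x) = true := fun x hx => by simp [h3 x hx]
  have e1 : aSkipSp regex.toList 0 = ((c :: d') ++ (s2 ++ ',' :: (s3 ++ '}' :: r)), s1.length) := by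
    rw [aSkipSp_eq, hl, dropWhile_all_append _ hsp1, takeWhile_all_append _ hsp1]
    rw [dropWhile_head_false (v := (c :: d') ++ (s2 ++ ',' :: (s3 ++ '}' :: r))) (by
      intro x hx; simp at hx; rw [← hx]; exact isDig_beq_space (hd c (by simp)))]
    rw [takeWhile_head_false (v := (c :: d') ++ (s2 ++ ',' :: (s3 ++ '}' :: r))) (by
      intro x hx; simp at hx; rw [← hx]; exact isDig_beq_space (hd c (by simp)))]
    simp
  have e2 : aNum ((c :: d') ++ (s2 ++ ',' :: (s3 ++ '}' :: r))) s1.length 0 =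
      (s2 ++ ',' :: (s3 ++ '}' :: r), s1.length + (c :: d').length, valOf (c :: d')) := by
    rw [aNum_eq]
    rw [dropWhile_all_append _ hd, takeWhile_all_append _ hd]
    rw [dropWhile_head_false (hv := head_sp_nd s2 _ ',' h2 (by decide))]
    rw [takeWhile_head_false (hv := head_sp_nd s2 _ ',' h2 (by decide))]
    simp [valOf]
  have e3 : aSkipSp (s2 ++ ',' :: (s3 ++ '}' :: r)) (s1.length + (c :: d').length) =
      (',' :: (s3 ++ '}' :: r), s1.length + (c :: d').length + s2.length) := by
    rw [aSkipSp_eq, dropWhile_all_append _ hsp2, takeWhile_all_append _ hsp2]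
    simp
  have e4 : aSkipSp (s3 ++ '}' :: r) (s1.length + (c :: d').length + s2.length + 1) =
      ('}' :: r, s1.length + (c :: d').length + s2.length + 1 + s3.length) := by
    rw [aSkipSp_eq, dropWhile_all_append _ hsp3, takeWhile_all_append _ hsp3]
    simp
  unfold parseMinMax_py
  simp only [e1, e2, e3, e4]
  simp [hd c (by simp)]

theorem no_brace_mid2 (s1 d1 s2 s3 : List Char) (h1 : ∀ x ∈ s1, x = ' ') (h2 : ∀ x ∈ s2, x = ' ')
    (h3 : ∀ x ∈ s3, x = ' ') (hd : ∀ x ∈ d1, isDig x = true) :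
    '}' ∉ (s1 ++ d1 ++ s2) ++ ',' :: s3 := by
  intro hx
  rcases List.mem_append.1 hx with hx | hx
  · exact no_brace_mid s1 d1 s2 h1 h2 hd hx
  · rcases List.mem_cons.1 hx with hx | hx
    · exact absurd hx (by decide)
    · exact absurd (h3 _ hx) (by decide)

theorem B_case2 (regex : String) (s1 d1 s2 s3 r : List Char)
    (hl : regex.toList = s1 ++ (d1 ++ (s2 ++ ',' :: (s3 ++ '}' :: r))))
    (h1 : ∀ x ∈ s1, x = ' ') (h2 : ∀ x ∈ s2, x = ' ') (h3 : ∀ x ∈ s3, x = ' ')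
    (hd : ∀ x ∈ d1, isDig x = true) (hne : d1 ≠ []) :
    parseMinMax_py_alt regex =
      (((s1.length + d1.length + s2.length + 1 + s3.length : Nat) : Int) + 1, valOf d1, none) := by
  have hpre : regex.toList = ((s1 ++ d1 ++ s2) ++ ',' :: s3) ++ '}' :: r := by
    simpa [List.append_assoc] using hl
  have hidx : PySem.List.index? regex.toList '}' = some ((s1 ++ d1 ++ s2) ++ ',' :: s3).length := by
    rw [PySem.List.index?_eq_idxOf?, hpre, idxOf_brace _ _ (no_brace_mid2 s1 d1 s2 s3 h1 h2 h3 hd)]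
  have htake : regex.toList.take ((s1 ++ d1 ++ s2) ++ ',' :: s3).length = (s1 ++ d1 ++ s2) ++ ',' :: s3 := by
    rw [hpre]; exact List.take_left
  have hsplit : PySem.Chars.splitOn ((s1 ++ d1 ++ s2) ++ ',' :: s3) [','] = [s1 ++ d1 ++ s2, s3] :=
    splitOn_pair _ _ (no_comma_mid s1 d1 s2 h1 h2 hd) (fun hx => absurd (h3 _ hx) (by decide))
  have hstrip := strip_mid s1 d1 s2 h1 h2 hd hne
  have hall : (d1.any fun c => !(isDig c)) = false := by
    simp only [List.any_eq_false]
    intro x hx; simp [hd x hx]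
  have hemp : d1.isEmpty = false := by simpa [List.isEmpty_iff] using hne
  unfold parseMinMax_py_alt
  simp only [hidx, htake, hsplit]
  simp only [List.headD_cons, hstrip, List.length_cons, List.length_nil]
  simp [hemp, hall, strip_spaces s3 h3, valOf]
  omega
theorem A_case3 (regex : String) (s1 d1 s2 s3 d2 s4 r : List Char)
    (hl : regex.toList = s1 ++ (d1 ++ (s2 ++ ',' :: (s3 ++ (d2 ++ (s4 ++ '}' :: r))))))
    (h1 : ∀ x ∈ s1, x = ' ') (h2 : ∀ x ∈ s2, x = ' ') (h3 : ∀ x ∈ s3, x = ' ')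
    (h4 : ∀ x ∈ s4, x = ' ')
    (hd : ∀ x ∈ d1, isDig x = true) (hne : d1 ≠ [])
    (hd2 : ∀ x ∈ d2, isDig x = true) (hne2 : d2 ≠ [])
    (hle : valOf d1 ≤ valOf d2) :
    parseMinMax_py regex =
      (((s1.length + d1.length + s2.length + 1 + s3.length + d2.length + s4.length : Nat) : Int) + 1,
        valOf d1, some (valOf d2)) := by
  obtain ⟨c, d', rfl⟩ : ∃ c d', d1 = c :: d' := by
    cases d1 with
    | nil => exact absurd rfl hne
    | cons a t => exact ⟨a, t, rfl⟩
  obtain ⟨c2, e', rfl⟩ : ∃ c2 e', d2 = c2 :: e' := by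
    cases d2 with
    | nil => exact absurd rfl hne2
    | cons a t => exact ⟨a, t, rfl⟩
  have hsp1 : ∀ x ∈ s1, ((fun c => c == ' ') x) = true := fun x hx => by simp [h1 x hx]
  have hsp2 : ∀ x ∈ s2, ((fun c => c == ' ') x) = true := fun x hx => by simp [h2 x hx]
  have hsp3 : ∀ x ∈ s3, ((fun c => c == ' ') x) = true := fun x hx => by simp [h3 x hx]
  have hsp4 : ∀ x ∈ s4, ((fun c => c == ' ') x) = true := fun x hx => by simp [h4 x hx]
  have e1 : aSkipSp regex.toList 0 =
      ((c :: d') ++ (s2 ++ ',' :: (s3 ++ ((c2 :: e') ++ (s4 ++ '}' :: r)))), s1.length) := by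
    rw [aSkipSp_eq, hl, dropWhile_all_append _ hsp1, takeWhile_all_append _ hsp1]
    rw [dropWhile_head_false (by
      intro x hx; simp at hx; rw [← hx]; exact isDig_beq_space (hd c (by simp)))]
    rw [takeWhile_head_false (by
      intro x hx; simp at hx; rw [← hx]; exact isDig_beq_space (hd c (by simp)))]
    simp
  have e2 : aNum ((c :: d') ++ (s2 ++ ',' :: (s3 ++ ((c2 :: e') ++ (s4 ++ '}' :: r))))) s1.length 0 =
      (s2 ++ ',' :: (s3 ++ ((c2 :: e') ++ (s4 ++ '}' :: r))), s1.length + (c :: d').length,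
        valOf (c :: d')) := by
    rw [aNum_eq]
    rw [dropWhile_all_append _ hd, takeWhile_all_append _ hd]
    rw [dropWhile_head_false (hv := head_sp_nd s2 _ ',' h2 (by decide))]
    rw [takeWhile_head_false (hv := head_sp_nd s2 _ ',' h2 (by decide))]
    simp [valOf]
  have e3 : aSkipSp (s2 ++ ',' :: (s3 ++ ((c2 :: e') ++ (s4 ++ '}' :: r)))) (s1.length + (c :: d').length) =
      (',' :: (s3 ++ ((c2 :: e') ++ (s4 ++ '}' :: r))), s1.length + (c :: d').length + s2.length) := by
    rw [aSkipSp_eq, dropWhile_all_append _ hsp2, takeWhile_all_append _ hsp2]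
    simp
  have e4 : aSkipSp (s3 ++ ((c2 :: e') ++ (s4 ++ '}' :: r))) (s1.length + (c :: d').length + s2.length + 1) =
      ((c2 :: e') ++ (s4 ++ '}' :: r), s1.length + (c :: d').length + s2.length + 1 + s3.length) := by
    rw [aSkipSp_eq, dropWhile_all_append _ hsp3, takeWhile_all_append _ hsp3]
    rw [dropWhile_head_false (by
      intro x hx; simp at hx; rw [← hx]; exact isDig_beq_space (hd2 c2 (by simp)))]
    rw [takeWhile_head_false (by
      intro x hx; simp at hx; rw [← hx]; exact isDig_beq_space (hd2 c2 (by simp)))]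
    simp
  have e5 : aNum ((c2 :: e') ++ (s4 ++ '}' :: r)) (s1.length + (c :: d').length + s2.length + 1 + s3.length) 0 =
      (s4 ++ '}' :: r, s1.length + (c :: d').length + s2.length + 1 + s3.length + (c2 :: e').length,
        valOf (c2 :: e')) := by
    rw [aNum_eq]
    rw [dropWhile_all_append _ hd2, takeWhile_all_append _ hd2]
    rw [dropWhile_head_false (hv := head_sp_nd s4 _ '}' h4 (by decide))]
    rw [takeWhile_head_false (hv := head_sp_nd s4 _ '}' h4 (by decide))]
    simp [valOf]
  have e6 : aSkipSp (s4 ++ '}' :: r)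
      (s1.length + (c :: d').length + s2.length + 1 + s3.length + (c2 :: e').length) =
      ('}' :: r, s1.length + (c :: d').length + s2.length + 1 + s3.length + (c2 :: e').length + s4.length) := by
    rw [aSkipSp_eq, dropWhile_all_append _ hsp4, takeWhile_all_append _ hsp4]
    simp
  have hc2 : c2 ≠ '}' := isDig_ne_brace (hd2 c2 (by simp))
  have hc2c : c2 ≠ ',' := isDig_ne_comma (hd2 c2 (by simp))
  have hnlt : ¬ (valOf (c2 :: e') < valOf (c :: d')) := not_lt.2 hle
  unfold parseMinMax_py
  simp only [e1, e2, e3, e4, e5, e6]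
  simp [hd c (by simp), hd2 c2 (by simp), hnlt]
theorem B_case3 (regex : String) (s1 d1 s2 s3 d2 s4 r : List Char)
    (hl : regex.toList = s1 ++ (d1 ++ (s2 ++ ',' :: (s3 ++ (d2 ++ (s4 ++ '}' :: r))))))
    (h1 : ∀ x ∈ s1, x = ' ') (h2 : ∀ x ∈ s2, x = ' ') (h3 : ∀ x ∈ s3, x = ' ')
    (h4 : ∀ x ∈ s4, x = ' ')
    (hd : ∀ x ∈ d1, isDig x = true) (hne : d1 ≠ [])
    (hd2 : ∀ x ∈ d2, isDig x = true) (hne2 : d2 ≠ [])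
    (hle : valOf d1 ≤ valOf d2) :
    parseMinMax_py_alt regex =
      (((s1.length + d1.length + s2.length + 1 + s3.length + d2.length + s4.length : Nat) : Int) + 1,
        valOf d1, some (valOf d2)) := by
  have hpre : regex.toList = ((s1 ++ d1 ++ s2) ++ ',' :: (s3 ++ d2 ++ s4)) ++ '}' :: r := by
    simpa [List.append_assoc] using hl
  have hnb : '}' ∉ (s1 ++ d1 ++ s2) ++ ',' :: (s3 ++ d2 ++ s4) := by
    intro hx
    rcases List.mem_append.1 hx with hx | hx
    · exact no_brace_mid s1 d1 s2 h1 h2 hd hx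
    · rcases List.mem_cons.1 hx with hx | hx
      · exact absurd hx (by decide)
      · exact no_brace_mid s3 d2 s4 h3 h4 hd2 hx
  have hidx : PySem.List.index? regex.toList '}' =
      some ((s1 ++ d1 ++ s2) ++ ',' :: (s3 ++ d2 ++ s4)).length := by
    rw [PySem.List.index?_eq_idxOf?, hpre, idxOf_brace _ _ hnb]
  have htake : regex.toList.take ((s1 ++ d1 ++ s2) ++ ',' :: (s3 ++ d2 ++ s4)).length =
      (s1 ++ d1 ++ s2) ++ ',' :: (s3 ++ d2 ++ s4) := by
    rw [hpre]; exact List.take_left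
  have hsplit : PySem.Chars.splitOn ((s1 ++ d1 ++ s2) ++ ',' :: (s3 ++ d2 ++ s4)) [','] =
      [s1 ++ d1 ++ s2, s3 ++ d2 ++ s4] :=
    splitOn_pair _ _ (no_comma_mid s1 d1 s2 h1 h2 hd) (no_comma_mid s3 d2 s4 h3 h4 hd2)
  have hstrip := strip_mid s1 d1 s2 h1 h2 hd hne
  have hstrip2 := strip_mid s3 d2 s4 h3 h4 hd2 hne2
  have hall : (d1.any fun c => !(isDig c)) = false := by
    simp only [List.any_eq_false]; intro x hx; simp [hd x hx]
  have hall2 : (d2.any fun c => !(isDig c)) = false := by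
    simp only [List.any_eq_false]; intro x hx; simp [hd2 x hx]
  have hemp : d1.isEmpty = false := by simpa [List.isEmpty_iff] using hne
  have hemp2 : d2.isEmpty = false := by simpa [List.isEmpty_iff] using hne2
  have hnlt : ¬ (valOf d2 < valOf d1) := not_lt.2 hle
  have hnlt' : ¬ (d2.foldl digStep 0 < d1.foldl digStep 0) := hnlt
  unfold parseMinMax_py_alt
  simp only [hidx, htake, hsplit]
  simp only [List.headD_cons, List.getD_cons_succ, List.getD_cons_zero, hstrip, hstrip2,
    List.length_cons, List.length_nil]
  simp [hemp, hemp2, hall, hall2, valOf, hnlt']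
  omega
theorem mem_tw_sp (l : List Char) : ∀ x ∈ l.takeWhile (· == ' '), x = ' ' := by
  intro x hx
  have h := List.mem_takeWhile_imp hx
  simpa using h

theorem mem_tw_dig (l : List Char) : ∀ x ∈ l.takeWhile isDig, isDig x = true := by
  intro x hx
  exact List.mem_takeWhile_imp hx

theorem parseMinMax_py_spec : Claim_equal_parseMinMax_py := by
  intro regex _ hpre
  unfold Spec_parseMinMax_py
  unfold Pre_parseMinMax_py at hpre
  obtain ⟨hne, hbr⟩ := hpre
  have hsp : ∀ x ∈ regex.toList.takeWhile (· == ' '), x = ' ' := mem_tw_sp _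
  have hQ1 : regex.toList = regex.toList.takeWhile (· == ' ') ++ regex.toList.dropWhile (· == ' ') :=
    (List.takeWhile_append_dropWhile).symm
  generalize hS1 : regex.toList.takeWhile (· == ' ') = s1 at *
  generalize hL1 : regex.toList.dropWhile (· == ' ') = l1 at *
  have hd1 : ∀ x ∈ l1.takeWhile isDig, isDig x = true := mem_tw_dig _
  have hQ2 : l1 = l1.takeWhile isDig ++ l1.dropWhile isDig := (List.takeWhile_append_dropWhile).symm
  generalize hD1 : l1.takeWhile isDig = d1 at *
  generalize hL2 : l1.dropWhile isDig = l2 at *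
  have hsp2 : ∀ x ∈ l2.takeWhile (· == ' '), x = ' ' :=
    mem_tw_sp _
  have hQ3 : l2 = l2.takeWhile (· == ' ') ++ l2.dropWhile (· == ' ') :=
    (List.takeWhile_append_dropWhile).symm
  generalize hS2 : l2.takeWhile (· == ' ') = s2 at *
  generalize hL3 : l2.dropWhile (· == ' ') = l3 at *
  rcases hbr with hb | ⟨hb, hrest⟩
  · -- "NUM}" form
    obtain ⟨t, rfl⟩ : ∃ t, l3 = '}' :: t := by
      cases l3 with
      | nil => simp at hb
      | cons a t => simp at hb; exact ⟨t, by rw [hb]⟩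
    have hl : regex.toList = s1 ++ (d1 ++ (s2 ++ '}' :: t)) := by
      rw [hQ1, hQ2, hQ3]
    rw [A_case1 regex s1 d1 s2 t hl hsp hsp2 hd1 hne,
        B_case1 regex s1 d1 s2 t (by simpa [List.append_assoc] using hl) hsp hsp2 hd1 hne]
  · -- comma forms
    obtain ⟨t, rfl⟩ : ∃ t, l3 = ',' :: t := by
      cases l3 with
      | nil => simp at hb
      | cons a t => simp at hb; exact ⟨t, by rw [hb]⟩
    simp only [List.tail_cons] at hrest
    have hsp3 : ∀ x ∈ t.takeWhile (· == ' '), x = ' ' :=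
      mem_tw_sp _
    have hQ4 : t = t.takeWhile (· == ' ') ++ t.dropWhile (· == ' ') :=
      (List.takeWhile_append_dropWhile).symm
    generalize hS3 : t.takeWhile (· == ' ') = s3 at *
    generalize hR1 : t.dropWhile (· == ' ') = r1 at *
    rcases hrest with hb2 | ⟨hne2, hle, hb2⟩
    · -- "NUM,}" form
      obtain ⟨u, rfl⟩ : ∃ u, r1 = '}' :: u := by
        cases r1 with
        | nil => simp at hb2
        | cons a u => simp at hb2; exact ⟨u, by rw [hb2]⟩
      have hl : regex.toList = s1 ++ (d1 ++ (s2 ++ ',' :: (s3 ++ '}' :: u))) := by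
        rw [hQ1, hQ2, hQ3, hQ4]
      rw [A_case2 regex s1 d1 s2 s3 u hl hsp hsp2 hsp3 hd1 hne,
          B_case2 regex s1 d1 s2 s3 u hl hsp hsp2 hsp3 hd1 hne]
    · -- "NUM,NUM}" form
      have hd2 : ∀ x ∈ r1.takeWhile isDig, isDig x = true := mem_tw_dig _
      have hQ5 : r1 = r1.takeWhile isDig ++ r1.dropWhile isDig := (List.takeWhile_append_dropWhile).symm
      generalize hD2 : r1.takeWhile isDig = d2 at *
      generalize hR2 : r1.dropWhile isDig = r2 at *
      have hsp4 : ∀ x ∈ r2.takeWhile (· == ' '), x = ' ' :=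
        mem_tw_sp _
      have hQ6 : r2 = r2.takeWhile (· == ' ') ++ r2.dropWhile (· == ' ') :=
        (List.takeWhile_append_dropWhile).symm
      generalize hS4 : r2.takeWhile (· == ' ') = s4 at *
      generalize hR3 : r2.dropWhile (· == ' ') = r3 at *
      obtain ⟨u, rfl⟩ : ∃ u, r3 = '}' :: u := by
        cases r3 with
        | nil => simp at hb2
        | cons a u => simp at hb2; exact ⟨u, by rw [hb2]⟩
      have hl : regex.toList = s1 ++ (d1 ++ (s2 ++ ',' :: (s3 ++ (d2 ++ (s4 ++ '}' :: u))))) := by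
        rw [hQ1, hQ2, hQ3, hQ4, hQ5, hQ6]
      rw [A_case3 regex s1 d1 s2 s3 d2 s4 u hl hsp hsp2 hsp3 hsp4 hd1 hne hd2 hne2 hle,
          B_case3 regex s1 d1 s2 s3 d2 s4 u hl hsp hsp2 hsp3 hsp4 hd1 hne hd2 hne2 hle]
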